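-- pv_equiv track=rewrite | github.com/Zovengrogg/python_projects | project_euler/Euler32_PandigitalProducts.py | checkFactors
-- ===== SOURCE A (Python) =====
-- def checkFactors(factors, digits):
--     # Not sure why I can't set this to digits
--     digitList = [i for i in digits]
--     for factor in factors:
--         for i in str(factor):
--             if(int(i) in digitList):
--                 return False
--             digitList.append(int(i))
--     if(len(digitList) == 10):
--         return True
--     return False
-- ===== SOURCE B (Python) =====
-- def checkFactors(factors, digits):
--     ds = list(digits)
--     fd = [int(c) for f in factors for c in str(f)]
--     return len(fd) == len(set(fd)) and set(fd).isdisjoint(ds) and len(ds) + len(fd) == 10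
-- ===== Notes on version B (the rewrite author's own statement) =====
-- stated objective: simpler
-- what changed: Replaces A's incremental append-and-early-return membership loop with one bulk collection of all factor digits followed by three set-based checks (no internal duplicates, disjoint from digits, total count 10).
-- outside the precondition, e.g. on checkFactors([9, 11, 10, 92, -19], [10]): A returns False, B raises ValueError
import Mathlib
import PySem

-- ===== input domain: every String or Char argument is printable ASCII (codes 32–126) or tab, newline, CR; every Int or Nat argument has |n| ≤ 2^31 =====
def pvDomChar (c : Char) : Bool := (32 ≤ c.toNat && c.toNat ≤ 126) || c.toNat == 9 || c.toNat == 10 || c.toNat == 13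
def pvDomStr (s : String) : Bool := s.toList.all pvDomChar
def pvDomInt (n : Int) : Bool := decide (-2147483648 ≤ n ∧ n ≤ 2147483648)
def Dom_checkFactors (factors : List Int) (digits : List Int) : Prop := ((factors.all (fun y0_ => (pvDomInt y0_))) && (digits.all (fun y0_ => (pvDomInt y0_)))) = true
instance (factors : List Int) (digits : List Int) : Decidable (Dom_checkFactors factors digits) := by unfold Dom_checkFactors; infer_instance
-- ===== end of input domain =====

-- B replaces A's incremental append-and-early-return membership loop by one bulk pass:
-- collect all factor digits, then use set operations (no duplicates, disjoint from digits,
-- total count 10).  Objective: simpler; same cost.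


-- ===== PORT A =====
-- int(c) on a single character; exact on digit characters (Pre_ guarantees every
-- character of str(factor) is a digit; on '-' Python raises and Pre_ excludes it).
def pvIntOfChar (c : Char) : Int := (PySem.Int.ofStr? (String.ofList [c])).getD 0

-- inner loop 'for i in str(factor)': none = the early 'return False'
def checkFactorsInner (digitList : List Int) (cs : List Char) : Option (List Int) :=
  match cs with
  | [] => some digitList
  | c :: rest =>
    if digitList.contains (pvIntOfChar c) then none
    else checkFactorsInner (digitList ++ [pvIntOfChar c]) rest

-- outer loop 'for factor in factors'
def checkFactorsOuter (digitList : List Int) (factors : List Int) : Option (List Int) :=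
  match factors with
  | [] => some digitList
  | f :: rest =>
    match checkFactorsInner digitList (PySem.Int.toStr f).toList with
    | none => none
    | some dl => checkFactorsOuter dl rest

def checkFactors (factors : List Int) (digits : List Int) : Bool :=
  match checkFactorsOuter digits factors with
  | none => false
  | some digitList => digitList.length == 10

-- ===== PORT B =====
def checkFactors_alt (factors : List Int) (digits : List Int) : Bool :=
  let ds := digits
  let fd := factors.flatMap (fun f => (PySem.Int.toStr f).toList.map pvIntOfChar)
  fd.length == (PySem.Set.ofList fd).length
    && fd.all (fun d => !ds.contains d)
    && (ds.length + fd.length == 10)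

-- ===== PRECONDITION & SPEC =====
-- Pre_ excludes lists with a negative factor: there int('-') raises ValueError in A unless A's
-- duplicate check already returned False on an earlier digit, and B, which parses all factor
-- digits eagerly, raises ValueError in every such case.
def Pre_checkFactors (factors : List Int) (digits : List Int) : Prop := ∀ f ∈ factors, 0 ≤ f
instance (factors : List Int) (digits : List Int) : Decidable (Pre_checkFactors factors digits) := by unfold Pre_checkFactors; infer_instance
def pvWitness_checkFactors : List Int × List Int := ([12, 345], [6, 7, 8, 9, 0])

def Spec_checkFactors (factors : List Int) (digits : List Int) (out : Bool) : Prop := out = checkFactors_alt factors digits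
instance (factors : List Int) (digits : List Int) (out : Bool) : Decidable (Spec_checkFactors factors digits out) := by unfold Spec_checkFactors; infer_instance

-- ===== CLAIM (what is proved, stated in full; the proofs are below) =====
def Claim_equal_checkFactors : Prop := ∀ (factors : List Int) (digits : List Int), Dom_checkFactors factors digits → Pre_checkFactors factors digits → Spec_checkFactors factors digits (checkFactors factors digits)

-- ===== LEMMAS AND PROOFS =====

-- the inner loop succeeds iff the chars' values are pairwise distinct and avoid digitList,
-- and then it returns digitList ++ those values
theorem inner_spec (cs : List Char) (dl : List Int) :
    checkFactorsInner dl cs =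
      if (cs.map pvIntOfChar).Nodup ∧ ∀ v ∈ cs.map pvIntOfChar, v ∉ dl
      then some (dl ++ cs.map pvIntOfChar) else none := by
  induction cs generalizing dl with
  | nil => simp [checkFactorsInner]
  | cons c rest ih =>
    simp only [checkFactorsInner, List.map_cons]
    by_cases hc : dl.contains (pvIntOfChar c)
    · rw [if_pos hc]
      rw [if_neg]
      rintro ⟨-, hall⟩
      exact hall (pvIntOfChar c) (List.mem_cons_self) (by simpa using hc)
    · rw [if_neg hc, ih]
      simp only [List.contains_eq_mem, decide_eq_true_eq] at hc
      by_cases h : (pvIntOfChar c :: rest.map pvIntOfChar).Nodup ∧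
          ∀ v ∈ pvIntOfChar c :: rest.map pvIntOfChar, v ∉ dl
      · rw [if_pos, if_pos h]
        · simp
        · obtain ⟨hnd, hall⟩ := h
          simp only [List.nodup_cons] at hnd
          refine ⟨hnd.2, ?_⟩
          intro v hv
          simp only [List.mem_append, List.mem_singleton]
          rintro (h1 | rfl)
          · exact hall v (by simp [hv]) h1
          · exact hnd.1 hv
      · rw [if_neg, if_neg h]
        rintro ⟨hnd, hall⟩
        apply h
        constructor
        · simp only [List.nodup_cons]
          refine ⟨fun hm => ?_, hnd⟩
          exact hall _ hm (by simp)
        · intro v hv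
          rcases List.mem_cons.mp hv with rfl | hv'
          · exact hc
          · intro hvdl
            exact hall v hv' (by simp [hvdl])

-- the outer loop succeeds iff all factor digits are pairwise distinct and avoid digitList
theorem outer_spec (factors : List Int) (dl : List Int) :
    checkFactorsOuter dl factors =
      (let fd := factors.flatMap (fun f => (PySem.Int.toStr f).toList.map pvIntOfChar)
       if fd.Nodup ∧ ∀ v ∈ fd, v ∉ dl then some (dl ++ fd) else none) := by
  induction factors generalizing dl with
  | nil => simp [checkFactorsOuter]
  | cons f rest ih =>
    simp only [checkFactorsOuter, inner_spec, List.flatMap_cons]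
    set vs := (PySem.Int.toStr f).toList.map pvIntOfChar with hvs
    set fdr := rest.flatMap (fun f => (PySem.Int.toStr f).toList.map pvIntOfChar) with hfdr
    by_cases h1 : vs.Nodup ∧ ∀ v ∈ vs, v ∉ dl
    · rw [if_pos h1]
      simp only [ih]
      by_cases h2 : fdr.Nodup ∧ ∀ v ∈ fdr, v ∉ dl ++ vs
      · rw [if_pos h2, if_pos]
        · simp
        · obtain ⟨hnd2, hall2⟩ := h2
          have hdisj : ∀ v ∈ fdr, v ∉ vs := fun v hv hvvs =>
            hall2 v hv (by simp [hvvs])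
          refine ⟨List.nodup_append.mpr ⟨h1.1, hnd2, ?_⟩, ?_⟩
          · rintro a ha b hb rfl; exact hdisj a hb ha
          · intro v hv
            rcases List.mem_append.mp hv with h | h
            · exact h1.2 v h
            · intro hdl; exact hall2 v h (by simp [hdl])
      · rw [if_neg h2, if_neg]
        rintro ⟨hnd, hall⟩
        apply h2
        rw [List.nodup_append] at hnd
        refine ⟨hnd.2.1, fun v hv => ?_⟩
        intro hm
        rcases List.mem_append.mp hm with h | h
        · exact hall v (by simp [hv]) h
        · exact hnd.2.2 v h v hv rfl
    · rw [if_neg h1, if_neg]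
      rintro ⟨hnd, hall⟩
      apply h1
      rw [List.nodup_append] at hnd
      exact ⟨hnd.1, fun v hv => hall v (by simp [hv])⟩

theorem ofList_sublist {α : Type} [BEq α] [LawfulBEq α] (xs : List α) :
    (PySem.Set.ofList xs).Sublist xs := by
  induction xs with
  | nil => simp [PySem.Set.ofList]
  | cons x rest ih =>
    rw [PySem.Set.ofList_cons]
    simp only [PySem.Set.discard]
    exact List.Sublist.cons₂ x (List.Sublist.trans List.filter_sublist ih)

theorem length_ofList_eq_iff {α : Type} [BEq α] [LawfulBEq α] (xs : List α) :
    (PySem.Set.ofList xs).length = xs.length ↔ xs.Nodup := by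
  constructor
  · intro h
    have heq := (ofList_sublist xs).eq_of_length h
    rw [← heq]
    exact PySem.Set.nodup_ofList xs
  · intro h
    rw [PySem.Set.ofList_eq_self_of_nodup xs h]

-- ===== VERDICT (by name: the statement is the Claim_ definition above) =====
theorem checkFactors_spec : Claim_equal_checkFactors := by
  intro factors digits _ _
  unfold Spec_checkFactors checkFactors
  rw [outer_spec]
  set fd := factors.flatMap (fun f => (PySem.Int.toStr f).toList.map pvIntOfChar) with hfd
  have halt : checkFactors_alt factors digits =
      ((fd.length == (PySem.Set.ofList fd).length)
        && fd.all (fun d => !digits.contains d)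
        && (digits.length + fd.length == 10)) := rfl
  rw [halt]
  by_cases h : fd.Nodup ∧ ∀ v ∈ fd, v ∉ digits
  · rw [if_pos h]
    obtain ⟨hnd, hall⟩ := h
    have h1 : (fd.length == (PySem.Set.ofList fd).length) = true := by
      simp [(length_ofList_eq_iff fd).mpr hnd]
    have h2 : fd.all (fun d => !digits.contains d) = true := by
      simp only [List.all_eq_true]
      intro d hd
      simpa using hall d hd
    simp [h1, h2, List.length_append]
    exact fun _ => hall
  · rw [if_neg h]
    rcases Decidable.not_and_iff_or_not.mp h with h' | h'
    · have h1 : (fd.length == (PySem.Set.ofList fd).length) = false := by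
        simp only [beq_eq_false_iff_ne, ne_eq]
        intro heq
        exact h' ((length_ofList_eq_iff fd).mp heq.symm)
      rw [h1]
      simp
    · have h2 : fd.all (fun d => !digits.contains d) = false := by
        rw [List.all_eq_false]
        rcases not_forall.mp h' with ⟨v, hv⟩
        rcases Classical.not_imp.mp hv with ⟨hvf, hvd⟩
        exact ⟨v, hvf, by simp [not_not.mp hvd]⟩
      rw [h2]
      simp
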